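-- pv_equiv track=rewrite | github.com/shafinsiddique/algorithms-datastructures | leetcode/arrays3.py | n_unique_integers_summing_zero
-- ===== SOURCE A (Python) =====
-- def n_unique_integers_summing_zero(n):
--     '''output any list of n unique integers summing to 0.'''
--
--     if n == 1:
--         return [0]
--
--     else:
--         if n % 2 == 0:
--             output = []
--             curr_number = 1
--             while len(output) < n:
--                 output.append(curr_number)
--                 output.append(-curr_number)
--                 curr_number += 1
--
--         else:
--             output = n_unique_integers_summing_zero(n-1)
--             output.append(0)
--
--         return output
-- ===== SOURCE B (Python) =====
-- def n_unique_integers_summing_zero(n):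
--     '''output any list of n unique integers summing to 0.'''
--     m = n - n % 2
--     return [(j // 2 + 1) * (1 - 2 * (j % 2)) for j in range(m)] + [0] * (n % 2)
-- ===== Notes on version B (the rewrite author's own statement) =====
-- stated objective: simpler
-- what changed: Replaces A's recursion (the odd branch calls A on n-1) and pair-appending while-loop with a single closed-form comprehension: the element at index j is computed directly as (j//2+1)*(1-2*(j%2)) over range(n - n%2), with [0]*(n%2) appended; nothing is built incrementally in pairs.
import Mathlib
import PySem

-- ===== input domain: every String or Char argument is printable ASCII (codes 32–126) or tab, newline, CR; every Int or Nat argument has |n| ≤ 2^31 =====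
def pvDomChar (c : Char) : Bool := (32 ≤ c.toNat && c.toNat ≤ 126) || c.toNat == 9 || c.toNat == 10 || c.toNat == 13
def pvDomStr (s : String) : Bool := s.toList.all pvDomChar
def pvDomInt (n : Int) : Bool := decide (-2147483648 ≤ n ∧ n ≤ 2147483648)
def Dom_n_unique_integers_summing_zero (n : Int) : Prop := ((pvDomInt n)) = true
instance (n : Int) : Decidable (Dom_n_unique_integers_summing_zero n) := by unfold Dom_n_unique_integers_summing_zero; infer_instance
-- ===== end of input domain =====

-- ===== PORT A =====
-- B replaces A's recursion and pair-appending while-loop by a closed-form value for each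
-- index: one comprehension mapping j ↦ (j//2+1)*(1-2*(j%2)) over range(n - n%2), plus
-- [0]*(n%2)  (objective: simpler — no recursion, no loop state).
-- the 'while len(output) < n' loop of A's even branch
def nUniqLoopA (n : Int) (output : List Int) (curr : Int) : List Int :=
  if (output.length : Int) < n then
    nUniqLoopA n (output ++ [curr, -curr]) (curr + 1)
  else output
termination_by (n - output.length).toNat
decreasing_by simp at *; omega

def n_unique_integers_summing_zero (n : Int) : List Int :=
  if n = 1 then [0]
  else if PySem.Int.mod n 2 = 0 then nUniqLoopA n [] 1
  else n_unique_integers_summing_zero (n - 1) ++ [0]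
termination_by (PySem.Int.mod n 2).toNat
decreasing_by
  have h1 : PySem.Int.mod n 2 = n % 2 := PySem.Int.mod_eq_emod_of_pos (by omega)
  have h2 : PySem.Int.mod (n - 1) 2 = (n - 1) % 2 := PySem.Int.mod_eq_emod_of_pos (by omega)
  simp only [h1, h2] at *
  omega

-- ===== PORT B =====
def n_unique_integers_summing_zero_alt (n : Int) : List Int :=
  let m := n - PySem.Int.mod n 2
  (PySem.List.pyRange 0 m 1).map
      (fun j => (PySem.Int.floordiv j 2 + 1) * (1 - 2 * PySem.Int.mod j 2))
    ++ List.replicate (PySem.Int.mod n 2).toNat 0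

-- ===== PRECONDITION & SPEC =====
def Spec_n_unique_integers_summing_zero (n : Int) (out : List Int) : Prop := out = n_unique_integers_summing_zero_alt n
instance (n : Int) (out : List Int) : Decidable (Spec_n_unique_integers_summing_zero n out) := by unfold Spec_n_unique_integers_summing_zero; infer_instance

-- ===== CLAIM (what is proved, stated in full; the proofs are below) =====
def Claim_equal_n_unique_integers_summing_zero : Prop := ∀ (n : Int), Dom_n_unique_integers_summing_zero n → Spec_n_unique_integers_summing_zero n (n_unique_integers_summing_zero n)

-- ===== LEMMAS AND PROOFS =====

-- the list of k pairs [c,-c,c+1,-(c+1),...]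
def nUniqPairs : Nat → Int → List Int
  | 0, _ => []
  | k + 1, c => [c, -c] ++ nUniqPairs k (c + 1)

theorem nUniqLoopA_spec (k : Nat) : ∀ (n : Int) (output : List Int) (c : Int),
    (n - output.length).toNat = 2 * k → nUniqLoopA n output c = output ++ nUniqPairs k c := by
  induction k with
  | zero =>
    intro n output c h
    rw [nUniqLoopA]
    have : ¬ ((output.length : Int) < n) := by omega
    simp [this, nUniqPairs]
  | succ k ih =>
    intro n output c h
    rw [nUniqLoopA]
    have : (output.length : Int) < n := by omega
    simp only [this, if_true]
    have h2 : (n - ((output ++ [c, -c]).length : Int)).toNat = 2 * k := by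
      simp; omega
    rw [ih n (output ++ [c, -c]) (c + 1) h2]
    simp [nUniqPairs]

-- B's per-index closed form, mapped over an even-length range, yields the pair list
theorem nUniqMapB (k : Nat) : ∀ (a : Nat),
    (PySem.List.pyRange (2 * a) (2 * a + 2 * k) 1).map
      (fun j => (PySem.Int.floordiv j 2 + 1) * (1 - 2 * PySem.Int.mod j 2))
    = nUniqPairs k ((a : Int) + 1) := by
  induction k with
  | zero =>
    intro a
    rw [PySem.List.pyRange_one_eq_nil (by omega)]
    simp [nUniqPairs]
  | succ k ih =>
    intro a
    rw [PySem.List.pyRange_one_cons (by push_cast; omega)]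
    rw [PySem.List.pyRange_one_cons (by push_cast; omega)]
    have e1 : PySem.Int.floordiv (2 * (a : Int)) 2 = a := by
      rw [PySem.Int.floordiv_eq_ediv_of_pos (by omega)]; omega
    have e2 : PySem.Int.mod (2 * (a : Int)) 2 = 0 := by
      rw [PySem.Int.mod_eq_emod_of_pos (by omega)]; omega
    have e3 : PySem.Int.floordiv (2 * (a : Int) + 1) 2 = a := by
      rw [PySem.Int.floordiv_eq_ediv_of_pos (by omega)]; omega
    have e4 : PySem.Int.mod (2 * (a : Int) + 1) 2 = 1 := by
      rw [PySem.Int.mod_eq_emod_of_pos (by omega)]; omega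
    have hr : (2 * (a : Int) + 1 + 1 : Int) = 2 * ((a + 1 : Nat) : Int) := by push_cast; ring
    have hr2 : (2 * (a : Int) + 2 * ((k + 1 : Nat) : Int) : Int)
        = 2 * ((a + 1 : Nat) : Int) + 2 * (k : Int) := by push_cast; ring
    simp only [List.map_cons, e1, e2, e3, e4, hr, hr2]
    rw [ih (a + 1)]
    simp only [nUniqPairs, List.cons_append, List.nil_append]
    push_cast
    ring_nf

-- on any even n, A's while-loop equals B's mapped comprehension over range(n)
theorem nUniq_even (n : Int) (h : PySem.Int.mod n 2 = 0) :
    nUniqLoopA n [] 1 = (PySem.List.pyRange 0 n 1).map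
      (fun j => (PySem.Int.floordiv j 2 + 1) * (1 - 2 * PySem.Int.mod j 2)) := by
  by_cases hn : n ≤ 0
  · rw [nUniqLoopA]
    have : ¬ ((([] : List Int).length : Int) < n) := by simp; omega
    simp only [this, if_false]
    rw [PySem.List.pyRange_one_eq_nil (by omega)]
    simp
  · have hn : 0 < n := by omega
    have hmod : n % 2 = 0 := by
      rw [← PySem.Int.mod_eq_emod_of_pos (a := n) (b := 2) (by omega)]; exact h
    obtain ⟨k, hk⟩ : ∃ k : Nat, n = 2 * k := ⟨n.toNat / 2, by omega⟩
    rw [nUniqLoopA_spec k n [] 1 (by simp; omega)]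
    have h0 : (0 : Int) = 2 * ((0 : Nat) : Int) := by norm_num
    have h1 : n = 2 * ((0 : Nat) : Int) + 2 * (k : Int) := by omega
    rw [h0, h1, nUniqMapB k 0]
    norm_num

theorem nUniq_main (n : Int) :
    n_unique_integers_summing_zero n = n_unique_integers_summing_zero_alt n := by
  rw [n_unique_integers_summing_zero.eq_def]
  by_cases h1 : n = 1
  · subst h1
    simp only [if_true]
    decide
  · simp only [h1, if_false]
    have hm := PySem.Int.mod_two_eq n
    by_cases h2 : PySem.Int.mod n 2 = 0
    · simp only [h2, if_true]
      unfold n_unique_integers_summing_zero_alt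
      simp only [h2]
      rw [nUniq_even n h2]
      norm_num
    · -- odd case: A recurses on n-1 (even), appends 0
      simp only [h2, if_false]
      have hmo : PySem.Int.mod n 2 = 1 := by omega
      have hne : n - 1 ≠ 1 := by
        intro hc
        have : PySem.Int.mod n 2 = 0 := by
          rw [show n = 2 by omega]; decide
        omega
      have hme : PySem.Int.mod (n - 1) 2 = 0 := by
        have ha := PySem.Int.floordiv_mul_add_mod n 2
        have hb := PySem.Int.floordiv_mul_add_mod (n - 1) 2
        have hc := PySem.Int.mod_two_eq (n - 1)
        omega
      rw [n_unique_integers_summing_zero.eq_def]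
      simp only [hne, if_false, hme, if_true]
      unfold n_unique_integers_summing_zero_alt
      simp only [hmo]
      rw [nUniq_even (n - 1) hme]
      norm_num

-- ===== VERDICT (by name: the statement is the Claim_ definition above) =====
theorem n_unique_integers_summing_zero_spec : Claim_equal_n_unique_integers_summing_zero := by
  intro n _
  unfold Spec_n_unique_integers_summing_zero
  exact nUniq_main n
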